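-- pv_equiv track=rewrite | github.com/MDGroup-WatanabeLab/mdpython | Structure/stack.py | sort_atom_type
-- ===== SOURCE A (Python) =====
-- def sort_atom_type(atom_type):
--     atom_types = []
--     atom = sorted(set(atom_type), key = atom_type.index)
--     for i in atom:
--         for j in atom_type:
--             if i == j:
--                 atom_types.append(j)
--     return atom_types
-- ===== SOURCE B (Python) =====
-- def sort_atom_type(atom_type):
--     groups = {}
--     for j in atom_type:
--         groups.setdefault(j, []).append(j)
--     out = []
--     for bucket in groups.values():
--         out += bucket
--     return out
-- ===== Notes on version B (the rewrite author's own statement) =====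
-- stated objective: faster
-- what changed: One pass builds an insertion-ordered dict of per-value buckets (setdefault/append) and the result is their concatenation, replacing sorted(set(...), key=list.index) plus a full re-scan of the list for every distinct value.
import Mathlib
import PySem

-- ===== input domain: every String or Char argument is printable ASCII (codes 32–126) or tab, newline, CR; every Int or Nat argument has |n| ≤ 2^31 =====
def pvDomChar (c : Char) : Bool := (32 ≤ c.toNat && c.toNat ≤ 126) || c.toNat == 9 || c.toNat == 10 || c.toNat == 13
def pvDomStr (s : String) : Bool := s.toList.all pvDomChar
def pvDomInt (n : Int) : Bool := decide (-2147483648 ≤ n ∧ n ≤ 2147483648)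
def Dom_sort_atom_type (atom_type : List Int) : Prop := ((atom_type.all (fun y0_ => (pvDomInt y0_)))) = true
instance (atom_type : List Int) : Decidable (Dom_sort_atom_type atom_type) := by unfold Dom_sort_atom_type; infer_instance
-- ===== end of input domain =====

-- B groups the list in one pass into an insertion-ordered dict of buckets and concatenates them,
-- removing A's sorted(set(...), key=list.index) step and its per-distinct-value re-scan of the list (objective: faster).

-- ===== PORT A =====
-- set(atom_type) is PySem.Set.ofList; sorted(..., key=atom_type.index) is PySem.List.sorted with the
-- first-occurrence index as key (index? never returns none here since every set element is in atom_type,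
-- so .getD 0 is exact); the nested for-loops are two folds appending matching elements.
def sort_atom_type (atom_type : List Int) : List Int :=
  let atom := PySem.List.sorted (PySem.Set.ofList atom_type)
      (fun i => (PySem.List.index? atom_type i).getD 0)
  atom.foldl (fun atom_types i =>
    atom_type.foldl (fun acc j => if i == j then acc ++ [j] else acc) atom_types) []

-- ===== PORT B =====
-- groups.setdefault(j, []).append(j) is Dict.modify j [] (· ++ [j]); the final loop concatenates the values.
def sort_atom_type_alt (atom_type : List Int) : List Int :=
  let groups := atom_type.foldl (fun d j => d.modify j [] (fun l => l ++ [j])) PySem.Dict.empty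
  groups.values.foldl (fun out bucket => out ++ bucket) []

-- ===== PRECONDITION & SPEC =====
def Spec_sort_atom_type (atom_type : List Int) (out : List Int) : Prop := out = sort_atom_type_alt atom_type
instance (atom_type : List Int) (out : List Int) : Decidable (Spec_sort_atom_type atom_type out) := by unfold Spec_sort_atom_type; infer_instance

-- ===== CLAIM (what is proved, stated in full; the proofs are below) =====
def Claim_equal_sort_atom_type : Prop := ∀ (atom_type : List Int), Dom_sort_atom_type atom_type → Spec_sort_atom_type atom_type (sort_atom_type atom_type)

-- ===== LEMMAS AND PROOFS =====

-- index of a member, as a Nat via getD, is < the list's length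
theorem pv_idx_lt (xs : List Int) (a : Int) (ha : a ∈ xs) :
    (PySem.List.index? xs a).getD 0 < xs.length := by
  have hs : (PySem.List.index? xs a).isSome = true := (PySem.List.index?_isSome_iff xs a).mpr ha
  obtain ⟨k, hk⟩ := Option.isSome_iff_exists.mp hs
  obtain ⟨hlt, -, -⟩ := PySem.List.getElem_of_index?_eq_some hk
  rw [hk]; exact hlt

-- set(xs) in insertion order is ordered by first-occurrence index in xs
theorem pv_pairwise_idx (xs : List Int) :
    (PySem.Set.ofList xs).Pairwise
      (fun a b => (PySem.List.index? xs a).getD 0 ≤ (PySem.List.index? xs b).getD 0) := by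
  induction xs using List.reverseRecOn with
  | nil => simp [PySem.Set.ofList]
  | append_singleton xs x ih =>
    rw [PySem.Set.ofList_append_singleton]
    by_cases hx : x ∈ xs
    · have hc : (PySem.Set.ofList xs).contains x = true := by
        simp [PySem.Set.contains, PySem.Set.mem_ofList, hx]
      rw [PySem.Set.add, if_pos hc]
      refine ih.imp_of_mem (fun {a b} hamem hbmem hab => ?_)
      have ha : a ∈ xs := (PySem.Set.mem_ofList xs a).mp hamem
      have hb : b ∈ xs := (PySem.Set.mem_ofList xs b).mp hbmem
      rw [PySem.List.index?_append_of_mem [x] ha, PySem.List.index?_append_of_mem [x] hb]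
      exact hab
    · have hc : (PySem.Set.ofList xs).contains x = false := by
        simp [PySem.Set.contains, PySem.Set.mem_ofList, hx]
      rw [PySem.Set.add, hc]
      simp only [Bool.false_eq_true, if_false]
      rw [List.pairwise_append]
      refine ⟨?_, List.pairwise_singleton _ _, ?_⟩
      · refine ih.imp_of_mem (fun {a b} hamem hbmem hab => ?_)
        have ha : a ∈ xs := (PySem.Set.mem_ofList xs a).mp hamem
        have hb : b ∈ xs := (PySem.Set.mem_ofList xs b).mp hbmem
        rw [PySem.List.index?_append_of_mem [x] ha, PySem.List.index?_append_of_mem [x] hb]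
        exact hab
      · intro a hamem b hbmem
        have ha : a ∈ xs := (PySem.Set.mem_ofList xs a).mp hamem
        have hb : b = x := List.mem_singleton.mp hbmem
        subst hb
        rw [PySem.List.index?_append_of_mem [b] ha,
            PySem.List.index?_append_singleton_self xs b hx]
        have := pv_idx_lt xs a ha
        simpa using Nat.le_of_lt this

-- A's result is the first-occurrence groups flattened
theorem pv_A_eq (xs : List Int) :
    sort_atom_type xs =
      (PySem.Set.ofList xs).flatMap (fun i => xs.filter (fun j => i == j)) := by
  unfold sort_atom_type
  rw [PySem.List.sorted_eq_self_of_pairwise _ _ (pv_pairwise_idx xs)]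
  have hinner : ∀ (i : Int) (acc : List Int),
      xs.foldl (fun acc j => if i == j then acc ++ [j] else acc) acc
        = acc ++ xs.filter (fun j => i == j) := by
    intro i acc
    simpa using PySem.List.foldl_append_if (fun j => i == j) id xs acc
  calc (PySem.Set.ofList xs).foldl (fun atom_types i =>
          xs.foldl (fun acc j => if i == j then acc ++ [j] else acc) atom_types) []
      = (PySem.Set.ofList xs).foldl
          (fun acc i => acc ++ xs.filter (fun j => i == j)) [] := by
        exact PySem.List.foldl_congr_mem _ _ _ _ (fun acc i _ => hinner i acc)
    _ = _ := by
        simpa using PySem.List.foldl_append_eq_flatMap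
          (fun i => xs.filter (fun j => i == j)) (PySem.Set.ofList xs) []

-- the grouping dict: each bucket is the filter of xs at its key
theorem pv_groups_getD (xs : List Int) (k : Int) :
    ((xs.foldl (fun d j => d.modify j [] (fun l => l ++ [j])) PySem.Dict.empty).getD k [])
      = xs.filter (fun j => j == k) := by
  have hmap : xs.foldl (fun d j => d.modify j [] (fun l => l ++ [j])) PySem.Dict.empty
      = (xs.map (fun j => (j, j))).foldl
          (fun d p => d.modify p.1 [] (fun l => l ++ [p.2])) PySem.Dict.empty := by
    rw [List.foldl_map]
  rw [hmap, PySem.Dict.getD_foldl_modify_append]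
  simp [List.filter_map, List.map_map, Function.comp_def]

theorem pv_B_eq (xs : List Int) :
    sort_atom_type_alt xs =
      (PySem.Set.ofList xs).flatMap (fun k => xs.filter (fun j => j == k)) := by
  have hnd : ((xs.foldl (fun d j => d.modify j [] (fun l => l ++ [j]))
      PySem.Dict.empty).keys).Nodup :=
    PySem.Dict.nodup_keys_foldl_modify_key xs (fun x => x) []
      (fun _ x => (fun l => l ++ [x])) PySem.Dict.empty PySem.Dict.nodup_keys_empty
  have hkeys : ((xs.foldl (fun d j => d.modify j [] (fun l => l ++ [j]))
      PySem.Dict.empty).keys) = PySem.Set.ofList xs :=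
    (PySem.Dict.keys_foldl_modify xs ([] : List Int)
      (fun _ x => (fun l => l ++ [x])) PySem.Dict.empty).trans (by rfl)
  show List.foldl (fun out bucket => out ++ bucket) []
      ((xs.foldl (fun d j => d.modify j [] (fun l => l ++ [j])) PySem.Dict.empty).values) = _
  rw [PySem.Dict.values_eq_map_keys _ hnd [], hkeys,
      List.map_congr_left (fun k _ => pv_groups_getD xs k),
      PySem.List.foldl_append_eq_flatMap (fun b => b) _ []]
  simp [List.flatMap_map]

-- ===== VERDICT (by name: the statement is the Claim_ definition above) =====
theorem sort_atom_type_spec : Claim_equal_sort_atom_type := by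
  intro atom_type _
  unfold Spec_sort_atom_type
  rw [pv_A_eq, pv_B_eq]
  refine List.flatMap_congr (fun i _ => ?_)
  exact List.filter_congr (fun j _ => by simp [eq_comm])
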